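-- pv_equiv track=rewrite | github.com/Pramod-Potti-Krishnan/text-table-builder-v1.2 | app/core/hero/closing_slide_with_image_generator.py | _detect_domain
-- ===== SOURCE A (Python) =====
-- def _detect_domain(text: str) -> str:
--     """
--     Detect content domain from text for semantic cache categorization.
--
--     Args:
--         text: Combined narrative and topics text (lowercase)
--
--     Returns:
--         Domain identifier string
--     """
--     # Religious/Spiritual
--     if any(word in text for word in [
--         'shiva', 'hindu', 'temple', 'prayer', 'spiritual', 'sacred',
--         'meditation', 'worship', 'divine', 'god', 'goddess', 'religious',
--         'buddha', 'christian', 'islam', 'church', 'mosque', 'dharma'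
--     ]):
--         return "religious"
--
--     # Healthcare
--     if any(word in text for word in [
--         'health', 'medical', 'hospital', 'patient', 'diagnostic',
--         'clinical', 'doctor', 'nurse', 'healthcare', 'medicine'
--     ]):
--         return "healthcare"
--
--     # Technology
--     if any(word in text for word in [
--         'tech', 'software', 'digital', 'ai', 'data', 'cloud',
--         'code', 'algorithm', 'computing', 'system', 'cyber'
--     ]):
--         return "tech"
--
--     # Education
--     if any(word in text for word in [
--         'school', 'university', 'student', 'learning', 'education',
--         'teach', 'academic', 'classroom', 'course', 'curriculum'
--     ]):
--         return "education"
--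
--     # Finance
--     if any(word in text for word in [
--         'finance', 'business', 'market', 'trading', 'investment',
--         'bank', 'revenue', 'profit', 'economy', 'financial'
--     ]):
--         return "finance"
--
--     # Nature/Environment
--     if any(word in text for word in [
--         'nature', 'environment', 'climate', 'green', 'sustainable',
--         'wildlife', 'forest', 'ocean', 'conservation', 'ecosystem'
--     ]):
--         return "nature"
--
--     # Science
--     if any(word in text for word in [
--         'research', 'experiment', 'laboratory', 'chemistry', 'physics',
--         'biology', 'scientific', 'discovery', 'hypothesis', 'analysis'
--     ]):
--         return "science"
--
--     # Creative
--     if any(word in text for word in [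
--         'art', 'design', 'creative', 'music', 'artist', 'gallery',
--         'paint', 'sculpture', 'photography', 'illustration', 'visual'
--     ]):
--         return "creative"
--
--     return "default"
-- ===== SOURCE B (Python) =====
-- WORD_LISTS = [
--     ['shiva', 'hindu', 'temple', 'prayer', 'spiritual', 'sacred',
--      'meditation', 'worship', 'divine', 'god', 'goddess', 'religious',
--      'buddha', 'christian', 'islam', 'church', 'mosque', 'dharma'],
--     ['health', 'medical', 'hospital', 'patient', 'diagnostic',
--      'clinical', 'doctor', 'nurse', 'healthcare', 'medicine'],
--     ['tech', 'software', 'digital', 'ai', 'data', 'cloud',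
--      'code', 'algorithm', 'computing', 'system', 'cyber'],
--     ['school', 'university', 'student', 'learning', 'education',
--      'teach', 'academic', 'classroom', 'course', 'curriculum'],
--     ['finance', 'business', 'market', 'trading', 'investment',
--      'bank', 'revenue', 'profit', 'economy', 'financial'],
--     ['nature', 'environment', 'climate', 'green', 'sustainable',
--      'wildlife', 'forest', 'ocean', 'conservation', 'ecosystem'],
--     ['research', 'experiment', 'laboratory', 'chemistry', 'physics',
--      'biology', 'scientific', 'discovery', 'hypothesis', 'analysis'],
--     ['art', 'design', 'creative', 'music', 'artist', 'gallery',
--      'paint', 'sculpture', 'photography', 'illustration', 'visual'],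
-- ]
--
-- NAMES = ["religious", "healthcare", "tech", "education",
--          "finance", "nature", "science", "creative"]
--
-- # Flat multi-pattern table: every keyword tagged with its category priority.
-- KEYWORDS = [(w, prio) for prio, words in enumerate(WORD_LISTS) for w in words]
--
--
-- def _detect_domain(text: str) -> str:
--     # Position-driven multi-pattern scan: walk the text once left to right;
--     # at each position, record the best (lowest) priority of any keyword
--     # starting there.  No per-keyword substring search.
--     best = len(NAMES)
--     for i in range(len(text)):
--         for word, prio in KEYWORDS:
--             if prio < best and text.startswith(word, i):
--                 best = prio
--     return NAMES[best] if best < len(NAMES) else "default"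
-- ===== Notes on version B (the rewrite author's own statement) =====
-- stated objective: alternative
-- what changed: Replaces A's per-keyword substring membership chain (one `word in text` scan per keyword, returning at the first matching category) with a position-driven multi-pattern scan: one left-to-right pass over the text that, at each position, checks which tagged keyword starts there and keeps the minimum category priority, mapping it to a name at the end.
import Mathlib
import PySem

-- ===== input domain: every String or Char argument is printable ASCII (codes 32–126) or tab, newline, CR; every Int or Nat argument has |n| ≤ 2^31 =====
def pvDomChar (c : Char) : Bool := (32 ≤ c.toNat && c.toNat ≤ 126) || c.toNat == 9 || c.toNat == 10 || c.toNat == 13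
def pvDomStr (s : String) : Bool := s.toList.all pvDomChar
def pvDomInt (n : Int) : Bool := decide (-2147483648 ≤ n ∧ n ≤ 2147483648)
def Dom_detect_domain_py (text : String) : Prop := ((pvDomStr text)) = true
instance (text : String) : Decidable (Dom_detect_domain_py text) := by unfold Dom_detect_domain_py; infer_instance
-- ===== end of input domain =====

-- B replaces A's per-keyword substring-membership chain by a position-driven
-- multi-pattern scan over the text keeping the minimum matched priority
-- (objective: alternative).

-- ===== PORT A =====
def detect_domain_py (text : String) : String :=
  if (["shiva", "hindu", "temple", "prayer", "spiritual", "sacred", "meditation", "worship", "divine", "god", "goddess", "religious", "buddha", "christian", "islam", "church", "mosque", "dharma"]).any (fun w => PySem.Str.isIn w text) then "religious"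
  else
  if (["health", "medical", "hospital", "patient", "diagnostic", "clinical", "doctor", "nurse", "healthcare", "medicine"]).any (fun w => PySem.Str.isIn w text) then "healthcare"
  else
  if (["tech", "software", "digital", "ai", "data", "cloud", "code", "algorithm", "computing", "system", "cyber"]).any (fun w => PySem.Str.isIn w text) then "tech"
  else
  if (["school", "university", "student", "learning", "education", "teach", "academic", "classroom", "course", "curriculum"]).any (fun w => PySem.Str.isIn w text) then "education"
  else
  if (["finance", "business", "market", "trading", "investment", "bank", "revenue", "profit", "economy", "financial"]).any (fun w => PySem.Str.isIn w text) then "finance"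
  else
  if (["nature", "environment", "climate", "green", "sustainable", "wildlife", "forest", "ocean", "conservation", "ecosystem"]).any (fun w => PySem.Str.isIn w text) then "nature"
  else
  if (["research", "experiment", "laboratory", "chemistry", "physics", "biology", "scientific", "discovery", "hypothesis", "analysis"]).any (fun w => PySem.Str.isIn w text) then "science"
  else
  if (["art", "design", "creative", "music", "artist", "gallery", "paint", "sculpture", "photography", "illustration", "visual"]).any (fun w => PySem.Str.isIn w text) then "creative"
  else "default"

-- ===== PORT B =====
def pvWordLists : List (List String) :=
[ ["shiva", "hindu", "temple", "prayer", "spiritual", "sacred", "meditation", "worship", "divine", "god", "goddess", "religious", "buddha", "christian", "islam", "church", "mosque", "dharma"],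
  ["health", "medical", "hospital", "patient", "diagnostic", "clinical", "doctor", "nurse", "healthcare", "medicine"],
  ["tech", "software", "digital", "ai", "data", "cloud", "code", "algorithm", "computing", "system", "cyber"],
  ["school", "university", "student", "learning", "education", "teach", "academic", "classroom", "course", "curriculum"],
  ["finance", "business", "market", "trading", "investment", "bank", "revenue", "profit", "economy", "financial"],
  ["nature", "environment", "climate", "green", "sustainable", "wildlife", "forest", "ocean", "conservation", "ecosystem"],
  ["research", "experiment", "laboratory", "chemistry", "physics", "biology", "scientific", "discovery", "hypothesis", "analysis"],
  ["art", "design", "creative", "music", "artist", "gallery", "paint", "sculpture", "photography", "illustration", "visual"] ]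

def pvNames : List String :=
["religious", "healthcare", "tech", "education", "finance", "nature", "science", "creative"]

-- KEYWORDS = [(w, prio) for prio, words in enumerate(WORD_LISTS) for w in words]
def pvKeywords : List (String × Nat) :=
  pvWordLists.zipIdx.flatMap (fun q => q.1.map (fun w => (w, q.2)))

-- text.startswith(word, i) for 0 ≤ i: word is a prefix of text[i:]
def pvStep (cs : List Char) (i : Nat) (b : Nat) (p : String × Nat) : Nat :=
  if p.2 < b ∧ PySem.Chars.startswith (cs.drop i) p.1.toList then p.2 else b

def detect_domain_py_alt (text : String) : String :=
  let cs := text.toList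
  let best : Nat :=
    (List.range cs.length).foldl (fun b i => pvKeywords.foldl (pvStep cs i) b) pvNames.length
  if best < pvNames.length then pvNames.getD best "default" else "default"

-- ===== PRECONDITION & SPEC =====
def Spec_detect_domain_py (text : String) (out : String) : Prop := out = detect_domain_py_alt text
instance (text : String) (out : String) : Decidable (Spec_detect_domain_py text out) := by unfold Spec_detect_domain_py; infer_instance

-- ===== CLAIM (what is proved, stated in full; the proofs are below) =====
def Claim_equal_detect_domain_py : Prop := ∀ (text : String), Dom_detect_domain_py text → Spec_detect_domain_py text (detect_domain_py text)

-- ===== LEMMAS AND PROOFS =====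

/-- Category c matches iff some of its keywords occurs in the text. -/
def pvCatMatch (text : String) (c : Nat) : Bool :=
  (pvWordLists.getD c []).any (fun w => PySem.Str.isIn w text)

/-- The least matching category index (8 if none) — A's fused chain computes this. -/
def pvLeast (text : String) : Nat :=
  if pvCatMatch text 0 then 0 else if pvCatMatch text 1 then 1 else
  if pvCatMatch text 2 then 2 else if pvCatMatch text 3 then 3 else
  if pvCatMatch text 4 then 4 else if pvCatMatch text 5 then 5 else
  if pvCatMatch text 6 then 6 else if pvCatMatch text 7 then 7 else 8

theorem pv_A_eq (text : String) :
    detect_domain_py text = pvNames.getD (pvLeast text) "default" := by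
  simp only [detect_domain_py, pvLeast, pvCatMatch, pvWordLists,
    List.getD_cons_zero, List.getD_cons_succ]
  split_ifs <;> rfl

theorem pv_least_le_eight (text : String) : pvLeast text ≤ 8 := by
  unfold pvLeast; split_ifs <;> omega

theorem pv_least_le (text : String) (c : Nat) (hc : c < 8)
    (h : pvCatMatch text c = true) : pvLeast text ≤ c := by
  unfold pvLeast
  split_ifs <;> first | omega | (interval_cases c <;> simp_all)

theorem pv_least_match (text : String) (h : pvLeast text < 8) :
    pvCatMatch text (pvLeast text) = true := by
  unfold pvLeast at *
  split_ifs at * <;> simp_all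

theorem pv_kw_facts : ∀ p ∈ pvKeywords,
    p.1 ∈ pvWordLists.getD p.2 [] ∧ p.2 < 8 ∧ p.1.toList ≠ [] := by decide

theorem pv_kw_rev : ∀ c < 8, ∀ w ∈ pvWordLists.getD c [], (w, c) ∈ pvKeywords := by decide

/-- Bounded position scan finds a word iff it is a substring (words nonempty). -/
theorem pv_occ_iff (text : String) (w : String) (hw : w.toList ≠ []) :
    (∃ i ∈ List.range text.toList.length,
        PySem.Chars.startswith (text.toList.drop i) w.toList = true)
      ↔ PySem.Str.isIn w text = true := by
  rw [show PySem.Str.isIn w text = PySem.Chars.isIn w.toList text.toList from rfl,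
    ← PySem.Chars.exists_prefix_drop_iff_isIn]
  constructor
  · rintro ⟨i, _, hpre⟩
    exact ⟨i, (PySem.Chars.startswith_iff _ _).mp hpre⟩
  · rintro ⟨j, hpre⟩
    by_cases hj : j < text.toList.length
    · exact ⟨j, List.mem_range.mpr hj, (PySem.Chars.startswith_iff _ _).mpr hpre⟩
    · exfalso
      rw [List.drop_eq_nil_of_le (by omega)] at hpre
      exact hw (List.prefix_nil.mp hpre)

theorem pv_inner_spec (cs : List Char) (i : Nat) :
    ∀ (l : List (String × Nat)) (b : Nat),
      l.foldl (pvStep cs i) b ≤ b ∧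
      (∀ p ∈ l, PySem.Chars.startswith (cs.drop i) p.1.toList = true →
          l.foldl (pvStep cs i) b ≤ p.2) ∧
      (l.foldl (pvStep cs i) b = b ∨
        ∃ p ∈ l, PySem.Chars.startswith (cs.drop i) p.1.toList = true ∧
          l.foldl (pvStep cs i) b = p.2) := by
  intro l
  induction l with
  | nil => intro b; simp
  | cons q r ih =>
    intro b
    simp only [List.foldl_cons]
    obtain ⟨ih1, ih2, ih3⟩ := ih (pvStep cs i b q)
    have hstep : pvStep cs i b q ≤ b ∧
        (PySem.Chars.startswith (cs.drop i) q.1.toList = true → pvStep cs i b q ≤ q.2) ∧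
        (pvStep cs i b q = b ∨ (PySem.Chars.startswith (cs.drop i) q.1.toList = true ∧
          pvStep cs i b q = q.2)) := by
      unfold pvStep
      split_ifs with h
      · exact ⟨le_of_lt h.1, fun _ => le_refl _, Or.inr ⟨h.2, rfl⟩⟩
      · refine ⟨le_refl _, fun hsw => ?_, Or.inl rfl⟩
        by_contra hlt
        exact h ⟨by omega, hsw⟩
    refine ⟨le_trans ih1 hstep.1, ?_, ?_⟩
    · intro p hp hsw
      rcases List.mem_cons.mp hp with rfl | hp
      · exact le_trans ih1 (hstep.2.1 hsw)
      · exact ih2 p hp hsw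
    · rcases ih3 with h | ⟨p, hp, hsw, he⟩
      · rcases hstep.2.2 with h' | ⟨hsw, he⟩
        · exact Or.inl (h.trans h')
        · exact Or.inr ⟨q, List.mem_cons_self .., hsw, h.trans he⟩
      · exact Or.inr ⟨p, List.mem_cons_of_mem _ hp, hsw, he⟩

theorem pv_outer_spec (cs : List Char) :
    ∀ (is' : List Nat) (b : Nat),
      is'.foldl (fun b i => pvKeywords.foldl (pvStep cs i) b) b ≤ b ∧
      (∀ i ∈ is', ∀ p ∈ pvKeywords,
          PySem.Chars.startswith (cs.drop i) p.1.toList = true →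
          is'.foldl (fun b i => pvKeywords.foldl (pvStep cs i) b) b ≤ p.2) ∧
      (is'.foldl (fun b i => pvKeywords.foldl (pvStep cs i) b) b = b ∨
        ∃ i ∈ is', ∃ p ∈ pvKeywords,
          PySem.Chars.startswith (cs.drop i) p.1.toList = true ∧
          is'.foldl (fun b i => pvKeywords.foldl (pvStep cs i) b) b = p.2) := by
  intro is'
  induction is' with
  | nil => intro b; simp
  | cons j r ih =>
    intro b
    simp only [List.foldl_cons]
    obtain ⟨ih1, ih2, ih3⟩ := ih (pvKeywords.foldl (pvStep cs j) b)
    obtain ⟨h1, h2, h3⟩ := pv_inner_spec cs j pvKeywords b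
    refine ⟨le_trans ih1 h1, ?_, ?_⟩
    · intro i hi p hp hsw
      rcases List.mem_cons.mp hi with rfl | hi
      · exact le_trans ih1 (h2 p hp hsw)
      · exact ih2 i hi p hp hsw
    · rcases ih3 with h | ⟨i, hi, p, hp, hsw, he⟩
      · rcases h3 with h' | ⟨p, hp, hsw, he⟩
        · exact Or.inl (h.trans h')
        · exact Or.inr ⟨j, List.mem_cons_self .., p, hp, hsw, h.trans he⟩
      · exact Or.inr ⟨i, List.mem_cons_of_mem _ hi, p, hp, hsw, he⟩

theorem pv_alt_eq (text : String) :
    detect_domain_py_alt text = pvNames.getD (pvLeast text) "default" := by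
  unfold detect_domain_py_alt
  simp only [show pvNames.length = 8 from rfl]
  obtain ⟨h1, h2, h3⟩ := pv_outer_spec text.toList (List.range text.toList.length) 8
  set best := (List.range text.toList.length).foldl
      (fun b i => pvKeywords.foldl (pvStep text.toList i) b) 8 with hbest
  have hb8 : best ≤ 8 := h1
  -- least ≤ best
  have hlb : pvLeast text ≤ best := by
    rcases h3 with h | ⟨i, hi, p, hp, hsw, he⟩
    · rw [h]; exact pv_least_le_eight text
    · obtain ⟨hmem, hlt, hne⟩ := pv_kw_facts p hp
      have hin : PySem.Str.isIn p.1 text = true :=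
        (pv_occ_iff text p.1 hne).mp ⟨i, hi, hsw⟩
      have hcm : pvCatMatch text p.2 = true := by
        unfold pvCatMatch
        exact List.any_eq_true.mpr ⟨p.1, hmem, hin⟩
      rw [he]; exact pv_least_le text p.2 hlt hcm
  -- best ≤ least
  have hbl : best ≤ pvLeast text := by
    by_cases hl : pvLeast text < 8
    · have hcm := pv_least_match text hl
      obtain ⟨w, hw, hin⟩ := List.any_eq_true.mp hcm
      have hkmem : (w, pvLeast text) ∈ pvKeywords := pv_kw_rev _ hl w hw
      have hne : w.toList ≠ [] := (pv_kw_facts _ hkmem).2.2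
      obtain ⟨i, hi, hsw⟩ := (pv_occ_iff text w hne).mpr hin
      exact h2 i hi (w, pvLeast text) hkmem hsw
    · have := pv_least_le_eight text
      omega
  have heq : best = pvLeast text := le_antisymm hbl hlb
  rw [heq]
  by_cases h : pvLeast text < 8
  · rw [if_pos h]
  · rw [if_neg h, show pvLeast text = 8 from by have := pv_least_le_eight text; omega]
    rfl

-- ===== VERDICT (by name: the statement is the Claim_ definition above) =====
theorem detect_domain_py_spec : Claim_equal_detect_domain_py := by
  intro text _
  unfold Spec_detect_domain_py
  rw [pv_A_eq, pv_alt_eq]
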